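-- pv_equiv track=rewrite | github.com/AlGaRitm2020/EGE_INFORMATICS | 23-task/23-set.py | f
-- ===== SOURCE A (Python) =====
-- def f(a, b, s):
-- 	if a >= b:
-- 		return s
-- 	if a % 2 ==0:
-- 		s.add(a)
--
-- 	n =  f(a + 3, b, s)
-- 	k =  f(a * 3, b, n)
-- 	s = k
-- 	return s
-- ===== SOURCE B (Python) =====
-- def f(a, b, s):
--     # iterative DFS: explicit stack + visited set, each distinct reachable
--     # value is processed once; mutates s in place like A
--     visited = set()
--     stack = [a]
--     while stack:
--         x = stack.pop()
--         if x >= b or x in visited: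
--             continue
--         visited.add(x)
--         if x % 2 == 0:
--             s.add(x)
--         stack.append(x * 3)
--         stack.append(x + 3)
--     return s
-- ===== Notes on version B (the rewrite author's own statement) =====
-- stated objective: alternative
-- what changed: Replaces A's unmemoized double recursion (which re-explores the same value exponentially often and threads the set through return values) by an iterative explicit-stack DFS with a visited set that processes every distinct reachable value exactly once.
import Mathlib
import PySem

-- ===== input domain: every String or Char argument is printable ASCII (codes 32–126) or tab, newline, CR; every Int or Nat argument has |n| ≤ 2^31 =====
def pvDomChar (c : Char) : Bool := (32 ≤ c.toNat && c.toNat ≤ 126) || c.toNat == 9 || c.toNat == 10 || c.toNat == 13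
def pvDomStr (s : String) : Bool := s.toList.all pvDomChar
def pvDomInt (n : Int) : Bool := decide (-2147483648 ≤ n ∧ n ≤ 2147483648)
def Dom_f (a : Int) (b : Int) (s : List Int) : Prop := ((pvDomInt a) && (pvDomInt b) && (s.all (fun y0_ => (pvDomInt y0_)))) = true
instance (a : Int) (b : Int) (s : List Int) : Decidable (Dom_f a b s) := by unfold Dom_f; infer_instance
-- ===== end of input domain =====

-- B: an iterative explicit-stack DFS with a visited set over the distinct reachable values,
-- instead of A's unmemoized double recursion (objective: alternative). Both A and B mutate
-- the Python set s in place; the equivalence proved here is about the RETURN value.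


-- ===== PORT A =====
-- fuel-bounded transcription of A's recursion; the fuel only makes the definition total:
-- on every input admitted by Pre_f the fuel is never exhausted (the recursion depth adds
-- at least 2 to a per level, so (b-a).toNat + 1 levels suffice)
def fAgo : Nat → Int → Int → List Int → List Int
  | 0, _, _, s => s
  | fuel+1, a, b, s =>
    if b ≤ a then s
    else
      let s1 := if a % 2 = 0 then PySem.Set.add s a else s
      let n := fAgo fuel (a + 3) b s1
      let k := fAgo fuel (a * 3) b n
      k

def f (a : Int) (b : Int) (s : List Int) : List Int :=
  fAgo ((b - a).toNat + 1) a b s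

-- ===== PORT B =====
-- fuel-bounded transcription of B's while-loop; the stack list's head is the top (Python's
-- list end): 'append x*3; append x+3; pop' becomes pushing (x+3) :: (x*3) :: rest. One fuel
-- unit per loop iteration; on every input admitted by Pre_f the loop runs at most
-- 1 + 2*(b-a).toNat iterations, so the fuel is never exhausted.
def fBloop : Nat → Int → List Int → List Int → List Int → List Int × List Int
  | 0, _, _, vis, s => (vis, s)
  | _+1, _, [], vis, s => (vis, s)
  | fuel+1, b, x :: rest, vis, s =>
    if b ≤ x ∨ x ∈ vis then fBloop fuel b rest vis s
    else fBloop fuel b ((x + 3) :: (x * 3) :: rest) (PySem.Set.add vis x)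
           (if x % 2 = 0 then PySem.Set.add s x else s)

def f_alt (a : Int) (b : Int) (s : List Int) : List Int :=
  (fBloop (2 * (b - a).toNat + 2) b [a] PySem.Set.empty s).2

-- ===== PRECONDITION & SPEC =====
-- Pre_f excludes exactly the inputs with a < b and a ≤ 0, on which A's recursion on a*3
-- never reaches b and raises RecursionError (A returns on all other inputs).
def Pre_f (a : Int) (b : Int) (s : List Int) : Prop := b ≤ a ∨ 0 < a
instance (a : Int) (b : Int) (s : List Int) : Decidable (Pre_f a b s) := by unfold Pre_f; infer_instance

def pvWitness_f : Int × Int × List Int := (1, 10, [])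

def Spec_f (a : Int) (b : Int) (s : List Int) (out : List Int) : Prop := out = f_alt a b s
instance (a : Int) (b : Int) (s : List Int) (out : List Int) : Decidable (Spec_f a b s out) := by unfold Spec_f; infer_instance

-- ===== CLAIM (what is proved, stated in full; the proofs are below) =====
def Claim_equal_f : Prop := ∀ (a : Int) (b : Int) (s : List Int), Dom_f a b s → Pre_f a b s → Spec_f a b s (f a b s)

-- ===== LEMMAS AND PROOFS =====

-- proof-only helper: B's DFS written as a recursion on one start value (the shape of the
-- recursion A makes), used as the bridge between the stack loop and A's recursion
def fBgo : Nat → Int → Int → List Int → List Int → List Int × List Int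
  | 0, _, _, vis, s => (vis, s)
  | fuel+1, b, x, vis, s =>
    if b ≤ x ∨ x ∈ vis then (vis, s)
    else
      let vis1 := PySem.Set.add vis x
      let s1 := if x % 2 = 0 then PySem.Set.add s x else s
      let r1 := fBgo fuel b (x + 3) vis1 s1
      fBgo fuel b (x * 3) r1.1 r1.2

-- one fold step: run the recursive DFS from x with just enough fuel
def fBstep (b : Int) (p : List Int × List Int) (x : Int) : List Int × List Int :=
  fBgo ((b - x).toNat + 1) b x p.1 p.2

-- values reachable from x by steps +3 / *3
inductive Reach : Int → Int → Prop
  | refl (x : Int) : Reach x x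
  | p3 {x z : Int} : Reach (x + 3) z → Reach x z
  | t3 {x z : Int} : Reach (x * 3) z → Reach x z

-- every even value < b reachable from y is already in s
def DoneAt (b y : Int) (s : List Int) : Prop :=
  ∀ z, Reach y z → z < b → z % 2 = 0 → z ∈ s

theorem Reach_le {x z : Int} (hx : 0 < x) (h : Reach x z) : x ≤ z := by
  induction h with
  | refl => omega
  | p3 _ ih => have := ih (by omega); omega
  | t3 _ ih => have := ih (by omega); omega

theorem Reach_cases {x z : Int} (h : Reach x z) :
    z = x ∨ Reach (x + 3) z ∨ Reach (x * 3) z := by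
  cases h with
  | refl => exact Or.inl rfl
  | p3 h => exact Or.inr (Or.inl h)
  | t3 h => exact Or.inr (Or.inr h)

theorem DoneAt_mono {b y : Int} {s s' : List Int}
    (hss : ∀ z ∈ s, z ∈ s') (h : DoneAt b y s) : DoneAt b y s' :=
  fun z hz hzb hze => hss z (h z hz hzb hze)

-- A's recursion is a no-op on a value whose whole reachable contribution is already in s
theorem fAgo_noop (b : Int) : ∀ (fuel : Nat) (x : Int) (s : List Int),
    0 < x → DoneAt b x s → fAgo fuel x b s = s := by
  intro fuel
  induction fuel with
  | zero => intro x s _ _; rfl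
  | succ fuel ih =>
    intro x s hx hdone
    by_cases hb : b ≤ x
    · simp [fAgo, hb]
    · have hs1 : (if x % 2 = 0 then PySem.Set.add s x else s) = s := by
        by_cases he : x % 2 = 0
        · have hmem : x ∈ s := hdone x (Reach.refl x) (by omega) he
          simp [he, PySem.Set.add_of_mem hmem]
        · simp [he]
      have h1 : fAgo fuel (x + 3) b s = s :=
        ih (x + 3) s (by omega) (fun z hz => hdone z (Reach.p3 hz))
      have h2 : fAgo fuel (x * 3) b s = s :=
        ih (x * 3) s (by omega) (fun z hz => hdone z (Reach.t3 hz))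
      simp only [fAgo]
      rw [if_neg hb, hs1, h1, h2]

-- main simulation lemma: the memoized DFS recursion from x computes exactly what A's
-- recursion from x computes, keeps the visited set closed, and only grows (visited, s)
theorem fBgo_main (b : Int) : ∀ (fuel : Nat) (x : Int) (vis s : List Int),
    0 < x → (b - x).toNat < fuel →
    (∀ y ∈ vis, 0 < y) →
    (∀ y ∈ vis, x ≤ y → DoneAt b y s) →
    (∀ fuelA, (b - x).toNat < fuelA → fAgo fuelA x b s = (fBgo fuel b x vis s).2) ∧
    (∀ y ∈ vis, y ∈ (fBgo fuel b x vis s).1) ∧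
    (∀ y ∈ (fBgo fuel b x vis s).1, y ∈ vis ∨ x ≤ y) ∧
    (∀ y ∈ (fBgo fuel b x vis s).1, 0 < y) ∧
    (∀ y ∈ (fBgo fuel b x vis s).1, x ≤ y → DoneAt b y (fBgo fuel b x vis s).2) ∧
    (∀ z ∈ s, z ∈ (fBgo fuel b x vis s).2) ∧
    (x < b → x ∈ (fBgo fuel b x vis s).1) := by
  intro fuel
  induction fuel with
  | zero => intro x vis s _ hf; omega
  | succ fuel ih =>
    intro x vis s hx hf hpos hdone
    by_cases hstop : b ≤ x ∨ x ∈ vis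
    · have hr : fBgo (fuel+1) b x vis s = (vis, s) := by simp [fBgo, hstop]
      rw [hr]
      refine ⟨?_, fun y hy => hy, fun y hy => Or.inl hy, hpos, fun y hy hxy => hdone y hy hxy,
        fun z hz => hz, ?_⟩
      · intro fuelA hfA
        rcases hstop with hb | hv
        · match fuelA, hfA with
          | fuelA + 1, _ => simp [fAgo, hb]
        · exact fAgo_noop b fuelA x s hx (hdone x hv le_rfl)
      · intro hxb
        rcases hstop with hb | hv
        · omega
        · exact hv
    · have hxb'' : ¬ b ≤ x := fun h => hstop (Or.inl h)
      have hxnv : x ∉ vis := fun h => hstop (Or.inr h)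
      have hxb : x < b := by omega
      set vis1 := PySem.Set.add vis x with hvis1
      set s1 := (if x % 2 = 0 then PySem.Set.add s x else s) with hs1
      have hmem_vis1 : ∀ y, y ∈ vis1 ↔ y ∈ vis ∨ y = x := by
        intro y; rw [hvis1]; exact PySem.Set.mem_add vis x y
      have hs_s1 : ∀ z ∈ s, z ∈ s1 := by
        intro z hz; rw [hs1]; split
        · exact (PySem.Set.mem_add s x z).mpr (Or.inl hz)
        · exact hz
      have ih1 := ih (x + 3) vis1 s1 (by omega) (by omega)
        (fun y hy => by rcases (hmem_vis1 y).mp hy with h | h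
                        · exact hpos y h
                        · omega)
        (fun y hy hxy => by
          rcases (hmem_vis1 y).mp hy with h | h
          · exact DoneAt_mono hs_s1 (hdone y h (by omega))
          · omega)
      obtain ⟨ha1, hb1, hc1, hd1, he1, hf1, hg1⟩ := ih1
      set r1 := fBgo fuel b (x + 3) vis1 s1 with hr1
      have ih2 := ih (x * 3) r1.1 r1.2 (by omega) (by omega) hd1
        (fun y hy hxy => by
          rcases hc1 y hy with h | h
          · rcases (hmem_vis1 y).mp h with h' | h'
            · exact DoneAt_mono hf1 (DoneAt_mono hs_s1 (hdone y h' (by omega)))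
            · omega
          · exact he1 y hy (by omega))
      obtain ⟨ha2, hb2, hc2, hd2, he2, hf2, hg2⟩ := ih2
      set r2 := fBgo fuel b (x * 3) r1.1 r1.2 with hr2
      have hr : fBgo (fuel+1) b x vis s = r2 := by
        simp only [fBgo]
        rw [if_neg hstop, hr2, hr1, hvis1, hs1]
      have hxs1even : x % 2 = 0 → x ∈ s1 := by
        intro he; rw [hs1]; simp [he, PySem.Set.mem_add]
      have hdone_x : DoneAt b x r2.2 := by
        intro z hz hzb hze
        rcases Reach_cases hz with h | h | h
        · subst h; exact hf2 _ (hf1 _ (hxs1even hze))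
        · by_cases hlt : x + 3 < b
          · exact hf2 _ (he1 (x + 3) (hg1 hlt) le_rfl z h hzb hze)
          · have := Reach_le (x := x + 3) (by omega) h; omega
        · by_cases hlt : x * 3 < b
          · exact he2 (x * 3) (hg2 hlt) le_rfl z h hzb hze
          · have := Reach_le (x := x * 3) (by omega) h; omega
      rw [hr]
      refine ⟨?_, ?_, ?_, hd2, ?_, ?_, ?_⟩
      · intro fuelA hfA
        match fuelA, hfA with
        | fuelA + 1, hfA =>
          have e1 : fAgo fuelA (x + 3) b s1 = r1.2 := ha1 fuelA (by omega)
          have e2 : fAgo fuelA (x * 3) b r1.2 = r2.2 := ha2 fuelA (by omega)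
          simp only [fAgo]
          rw [if_neg hxb'', ← hs1, e1, e2]
      · intro y hy
        exact hb2 y (hb1 y ((hmem_vis1 y).mpr (Or.inl hy)))
      · intro y hy
        rcases hc2 y hy with h | h
        · rcases hc1 y h with h' | h'
          · rcases (hmem_vis1 y).mp h' with h'' | h''
            · exact Or.inl h''
            · exact Or.inr (by omega)
          · exact Or.inr (by omega)
        · exact Or.inr (by omega)
      · intro y hy hxy
        rcases hc2 y hy with h | h
        · rcases hc1 y h with h' | h'
          · rcases (hmem_vis1 y).mp h' with h'' | h''
            · exact DoneAt_mono hf2 (DoneAt_mono hf1 (DoneAt_mono hs_s1 (hdone y h'' hxy)))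
            · subst h''; exact hdone_x
          · exact DoneAt_mono hf2 (he1 y h (by omega))
        · exact he2 y hy (by omega)
      · intro z hz
        exact hf2 z (hf1 z (hs_s1 z hz))
      · intro _
        exact hb2 x (hb1 x ((hmem_vis1 x).mpr (Or.inr rfl)))

-- fBgo does not depend on the fuel once the fuel exceeds the recursion depth
theorem fBgo_irrel (b : Int) : ∀ (fuel fuel' : Nat) (x : Int) (vis s : List Int),
    0 < x → (b - x).toNat < fuel → (b - x).toNat < fuel' →
    fBgo fuel b x vis s = fBgo fuel' b x vis s := by
  intro fuel
  induction fuel with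
  | zero => intro fuel' x vis s _ hf; omega
  | succ fuel ih =>
    intro fuel' x vis s hx hf hf'
    match fuel', hf' with
    | fuel' + 1, hf' =>
      by_cases hstop : b ≤ x ∨ x ∈ vis
      · simp [fBgo, hstop]
      · have hxb : x < b := by omega
        simp only [fBgo]
        rw [if_neg hstop, if_neg hstop]
        rw [ih fuel' (x + 3) _ _ (by omega) (by omega) (by omega),
            ih fuel' (x * 3) _ _ (by omega) (by omega) (by omega)]

-- the stack loop computes the left fold of the recursive DFS over the stack
theorem fBloop_fold (b m : Int) : ∀ (fuel : Nat) (stack vis s : List Int),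
    (∀ x ∈ stack, 0 < x ∧ m ≤ x) →
    stack.length + 2 * ((Finset.Icc m (b-1)).filter (fun v => v ∉ vis)).card ≤ fuel →
    fBloop fuel b stack vis s = List.foldl (fBstep b) (vis, s) stack := by
  intro fuel
  induction fuel with
  | zero =>
    intro stack vis s _ hf
    have : stack = [] := by
      cases stack with
      | nil => rfl
      | cons x t => simp at hf
    subst this; rfl
  | succ fuel ih =>
    intro stack vis s hpos hf
    cases stack with
    | nil => rfl
    | cons x rest =>
      by_cases hstop : b ≤ x ∨ x ∈ vis
      · have hstep : fBstep b (vis, s) x = (vis, s) := by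
          simp [fBstep, fBgo, hstop]
        simp only [fBloop, List.foldl]
        rw [if_pos hstop, hstep]
        exact ih rest vis s (fun y hy => hpos y (List.mem_cons_of_mem x hy))
          (by simp at hf ⊢; omega)
      · have hxb : x < b := by
          rcases not_or.mp hstop with ⟨h, _⟩; omega
        have hxnv : x ∉ vis := (not_or.mp hstop).2
        obtain ⟨hx0, hmx⟩ := hpos x (List.mem_cons_self)
        set vis1 := PySem.Set.add vis x with hvis1
        set s1 := (if x % 2 = 0 then PySem.Set.add s x else s) with hs1
        -- the unvisited-count drops by one
        have hcard : ((Finset.Icc m (b-1)).filter (fun v => v ∉ vis1)).card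
            = ((Finset.Icc m (b-1)).filter (fun v => v ∉ vis)).card - 1 := by
          have hset : (Finset.Icc m (b-1)).filter (fun v => v ∉ vis1)
              = ((Finset.Icc m (b-1)).filter (fun v => v ∉ vis)).erase x := by
            ext v
            simp only [Finset.mem_erase, Finset.mem_filter, hvis1]
            rw [PySem.Set.mem_add]
            tauto
          have hxmem : x ∈ (Finset.Icc m (b-1)).filter (fun v => v ∉ vis) := by
            simp only [Finset.mem_filter, Finset.mem_Icc]
            exact ⟨⟨hmx, by omega⟩, hxnv⟩
          rw [hset, Finset.card_erase_of_mem hxmem]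
        have hcpos : 0 < ((Finset.Icc m (b-1)).filter (fun v => v ∉ vis)).card := by
          have hxmem : x ∈ (Finset.Icc m (b-1)).filter (fun v => v ∉ vis) := by
            simp only [Finset.mem_filter, Finset.mem_Icc]
            exact ⟨⟨hmx, by omega⟩, hxnv⟩
          exact Finset.card_pos.mpr ⟨x, hxmem⟩
        have hih := ih ((x + 3) :: (x * 3) :: rest) vis1 s1
          (by
            intro y hy
            simp only [List.mem_cons] at hy
            rcases hy with rfl | rfl | hy
            · exact ⟨by omega, by omega⟩
            · exact ⟨by omega, by omega⟩
            · exact hpos y (List.mem_cons_of_mem x hy))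
          (by simp only [List.length_cons] at hf ⊢; omega)
        -- one recursive-DFS step equals expanding x on the stack
        have hstep : fBstep b (vis, s) x
            = fBstep b (fBstep b (vis1, s1) (x + 3)) (x * 3) := by
          simp only [fBstep]
          have hu : fBgo ((b - x).toNat + 1) b x vis s
              = fBgo (b - x).toNat b (x * 3)
                  (fBgo (b - x).toNat b (x + 3) vis1 s1).1
                  (fBgo (b - x).toNat b (x + 3) vis1 s1).2 := by
            simp only [fBgo]
            rw [if_neg hstop, ← hvis1, ← hs1]
          rw [hu,
            fBgo_irrel b (b - x).toNat ((b - (x + 3)).toNat + 1) (x + 3) vis1 s1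
              (by omega) (by omega) (by omega),
            fBgo_irrel b (b - x).toNat ((b - (x * 3)).toNat + 1) (x * 3) _ _
              (by omega) (by omega) (by omega)]
        simp only [fBloop, List.foldl]
        rw [if_neg hstop, ← hvis1, ← hs1, hih, hstep]
        simp [List.foldl]

-- ===== VERDICT (by name: the statement is the Claim_ definition above) =====
theorem f_spec : Claim_equal_f := by
  intro a b s _ hpre
  unfold Spec_f f f_alt
  by_cases hb : b ≤ a
  · simp [fAgo, fBloop, hb]
  · have ha : 0 < a := by
      rcases hpre with h | h
      · omega
      · exact h
    have hfold := fBloop_fold b a (2 * (b - a).toNat + 2) [a] PySem.Set.empty s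
      (by intro x hx; simp at hx; subst hx; exact ⟨ha, le_rfl⟩)
      (by
        have hcard : (Finset.Icc a (b-1)).card = (b - a).toNat := by
          have he : b - 1 + 1 - a = b - a := by ring
          rw [Int.card_Icc, he]
        simp only [List.length_cons, List.length_nil]
        refine le_trans (Nat.add_le_add_left (Nat.mul_le_mul_left 2
          (le_trans (Finset.card_filter_le _ _) (le_of_eq hcard))) _) ?_
        omega)
    rw [hfold]
    simp only [List.foldl, fBstep]
    have hf : (b - a).toNat < (b - a).toNat + 1 := by omega
    have hmain := fBgo_main b ((b - a).toNat + 1) a PySem.Set.empty s ha hf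
      (by intro y hy; simp [PySem.Set.empty] at hy)
      (by intro y hy; simp [PySem.Set.empty] at hy)
    exact hmain.1 ((b - a).toNat + 1) hf
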